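-- pv_equiv track=rewrite | github.com/jpma-fernandes/BIOINF_1 | crossover_corrected.py | remove_gap_only_columns
-- ===== SOURCE A (Python) =====
-- def remove_gap_only_columns(align):
--     """Remove colunas compostas apenas por gaps"""
--     if not align or len(align[0]) == 0:
--         return align
--
--     cols_to_keep = []
--     for col_idx in range(len(align[0])):
--         # Manter coluna se pelo menos uma sequência tem resíduo
--         if any(seq[col_idx] != '-' for seq in align):
--             cols_to_keep.append(col_idx)
--
--     # Reconstruir alinhamento
--     result = []
--     for seq in align:
--         new_seq = ''.join(seq[i] for i in cols_to_keep)
--         result.append(new_seq)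
--
--     return result
-- ===== SOURCE B (Python) =====
-- def remove_gap_only_columns(align):
--     """Remove colunas compostas apenas por gaps"""
--     if not align or len(align[0]) == 0:
--         return align
--
--     # single pass over the columns, growing one accumulator per row
--     rows = [[] for _ in align]
--     for col_idx in range(len(align[0])):
--         col = [seq[col_idx] for seq in align]
--         if any(c != '-' for c in col):
--             for row, c in zip(rows, col):
--                 row.append(c)
--
--     return [''.join(row) for row in rows]
-- ===== Notes on version B (the rewrite author's own statement) =====
-- stated objective: alternative
-- what changed: B drops A's kept-column index list and second reconstruction pass: it makes a single pass over the columns, appending each kept column's characters directly onto one per-row accumulator, then joins the rows.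
import Mathlib
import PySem

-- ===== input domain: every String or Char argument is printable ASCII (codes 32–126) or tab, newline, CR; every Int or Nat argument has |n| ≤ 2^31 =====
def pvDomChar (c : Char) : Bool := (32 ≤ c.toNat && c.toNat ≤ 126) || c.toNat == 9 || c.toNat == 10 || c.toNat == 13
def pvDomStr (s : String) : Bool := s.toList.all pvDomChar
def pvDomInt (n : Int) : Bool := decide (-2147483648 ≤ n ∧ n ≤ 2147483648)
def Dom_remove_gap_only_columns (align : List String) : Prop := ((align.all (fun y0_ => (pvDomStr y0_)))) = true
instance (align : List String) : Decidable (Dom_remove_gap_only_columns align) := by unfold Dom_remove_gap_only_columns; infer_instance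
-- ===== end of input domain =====

-- B replaces A's kept-column index list + second reconstruction pass by a single pass over the
-- columns that appends each kept column's characters onto per-row accumulators (alternative decomposition).


-- ===== PORT A =====
-- seq[i] is ported as seq.toList.getD i '-'; the default is never read under
-- Pre_remove_gap_only_columns (all indices are in range), where Python would raise IndexError.
def remove_gap_only_columns (align : List String) : List String :=
  if align = [] ∨ (align.headD "").length = 0 then align
  else
    align.map (fun seq => String.mk
      (((List.range (align.headD "").length).foldl
          (fun acc col_idx =>
            if align.any (fun seq => seq.toList.getD col_idx '-' ≠ '-') then acc ++ [col_idx]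
            else acc) []).map (fun i => seq.toList.getD i '-')))

-- ===== PORT B =====
def remove_gap_only_columns_alt (align : List String) : List String :=
  if align = [] ∨ (align.headD "").length = 0 then align
  else
    ((List.range (align.headD "").length).foldl
        (fun rows col_idx =>
          let col := align.map (fun seq => seq.toList.getD col_idx '-')
          if col.any (fun c => c ≠ '-') then (rows.zip col).map (fun p => p.1 ++ [p.2])
          else rows)
        (align.map (fun _ => ([] : List Char)))).map String.mk

-- ===== PRECONDITION & SPEC =====
-- Pre_ excludes exactly the ragged inputs on which Python A raises IndexError
-- (some row strictly shorter than the first row, with the first row nonempty).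
def Pre_remove_gap_only_columns (align : List String) : Prop :=
  align = [] ∨ (align.headD "").length = 0 ∨
    ∀ s ∈ align, (align.headD "").length ≤ s.length
instance (align : List String) : Decidable (Pre_remove_gap_only_columns align) := by
  unfold Pre_remove_gap_only_columns; infer_instance

def pvWitness_remove_gap_only_columns : List String := ["a--b", "-b--", "ab-c"]

def Spec_remove_gap_only_columns (align : List String) (out : List String) : Prop := out = remove_gap_only_columns_alt align
instance (align : List String) (out : List String) : Decidable (Spec_remove_gap_only_columns align out) := by unfold Spec_remove_gap_only_columns; infer_instance

-- ===== CLAIM (what is proved, stated in full; the proofs are below) =====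
def Claim_equal_remove_gap_only_columns : Prop := ∀ (align : List String), Dom_remove_gap_only_columns align → Pre_remove_gap_only_columns align → Spec_remove_gap_only_columns align (remove_gap_only_columns align)

-- ===== LEMMAS AND PROOFS =====

-- loop invariant: B's per-row accumulators are A's kept-column list mapped through each row
theorem pv_loop_eq (align : List String) (L : List Nat) (cols : List Nat) :
    L.foldl
      (fun rows col_idx =>
        let col := align.map (fun seq => seq.toList.getD col_idx '-')
        if col.any (fun c => c ≠ '-') then (rows.zip col).map (fun p => p.1 ++ [p.2])
        else rows)
      (align.map (fun seq => cols.map (fun i => seq.toList.getD i '-')))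
    =
    align.map (fun seq =>
      (L.foldl
        (fun acc col_idx =>
          if align.any (fun seq => seq.toList.getD col_idx '-' ≠ '-') then acc ++ [col_idx]
          else acc) cols).map (fun i => seq.toList.getD i '-')) := by
  induction L generalizing cols with
  | nil => simp
  | cons j t ih =>
    simp only [List.foldl_cons]
    by_cases h : align.any (fun seq => seq.toList.getD j '-' ≠ '-')
    · have hc : (align.map (fun seq => seq.toList.getD j '-')).any (fun c => c ≠ '-') = true := by
        simpa [List.any_map, Function.comp] using h
      rw [show ((align.map (fun seq => cols.map (fun i => seq.toList.getD i '-'))).zip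
            (align.map (fun seq => seq.toList.getD j '-'))).map (fun p => p.1 ++ [p.2])
          = align.map (fun seq => (cols ++ [j]).map (fun i => seq.toList.getD i '-')) by
        rw [List.zip_map']
        simp [List.map_map, Function.comp]]
      simp only [hc, h, if_pos, if_true]
      exact ih (cols ++ [j])
    · have hc : (align.map (fun seq => seq.toList.getD j '-')).any (fun c => c ≠ '-') = false := by
        simpa [List.any_map, Function.comp] using eq_false_of_ne_true h
      simp only [hc, eq_false_of_ne_true h, if_false, Bool.false_eq_true]
      exact ih cols

-- ===== VERDICT (by name: the statement is the Claim_ definition above) =====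
theorem remove_gap_only_columns_spec : Claim_equal_remove_gap_only_columns := by
  intro align _ _
  unfold Spec_remove_gap_only_columns remove_gap_only_columns remove_gap_only_columns_alt
  by_cases hg : align = [] ∨ (align.headD "").length = 0
  · rw [if_pos hg, if_pos hg]
  · rw [if_neg hg, if_neg hg]
    have h0 : align.map (fun _ => ([] : List Char))
        = align.map (fun seq => ([] : List Nat).map (fun i => seq.toList.getD i '-')) := by
      simp
    rw [h0, pv_loop_eq, List.map_map]
    rfl
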